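-- pv_equiv track=rewrite | github.com/nuncprotunc/windsurf | scripts/meta_patch_phase5.py | cap_anchors_hard
-- ===== SOURCE A (Python) =====
-- def cap_anchors_hard(anchors:dict):
--     anchors = anchors or {}
--     cases = list(anchors.get("cases") or [])
--     statutes = list(anchors.get("statutes") or [])
--     total = []
--     # keep original order: cases first, then statutes
--     for x in cases: total.append(("case", x))
--     for x in statutes: total.append(("statute", x))
--     total = total[:8]
--     # rebuild with preference to keep at least one of each if present
--     new_cases, new_statutes = [], []
--     for kind, val in total:
--         if kind == "case": new_cases.append(val)
--         else: new_statutes.append(val)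
--     anchors["cases"] = new_cases
--     anchors["statutes"] = new_statutes
--     return anchors
-- ===== SOURCE B (Python) =====
-- def cap_anchors_hard(anchors: dict):
--     anchors = anchors or {}
--     cases = list(anchors.get("cases") or [])
--     statutes = list(anchors.get("statutes") or [])
--     new_cases = cases[:8]
--     anchors["cases"] = new_cases
--     anchors["statutes"] = statutes[:max(0, 8 - len(new_cases))]
--     return anchors
-- ===== Notes on version B (the rewrite author's own statement) =====
-- stated objective: simpler
-- what changed: Replaces A's build-tagged-tuple-list / truncate / re-partition pipeline with two direct slice computations (cases[:8], then statutes capped to the remaining room via max(0, 8 - len))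
import Mathlib
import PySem

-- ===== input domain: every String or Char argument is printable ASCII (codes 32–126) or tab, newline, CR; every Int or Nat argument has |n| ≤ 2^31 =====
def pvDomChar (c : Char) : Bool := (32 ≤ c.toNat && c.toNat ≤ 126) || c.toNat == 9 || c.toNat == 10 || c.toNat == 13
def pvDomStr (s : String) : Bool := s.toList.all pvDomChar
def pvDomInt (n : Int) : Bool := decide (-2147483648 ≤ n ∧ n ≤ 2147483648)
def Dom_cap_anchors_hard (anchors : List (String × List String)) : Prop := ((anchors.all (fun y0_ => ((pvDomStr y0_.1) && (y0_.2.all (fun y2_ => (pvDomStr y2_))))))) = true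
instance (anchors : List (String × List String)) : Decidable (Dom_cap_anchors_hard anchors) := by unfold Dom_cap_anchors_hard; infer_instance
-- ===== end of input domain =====

-- B replaces A's tag-tuple build / truncate / re-partition pipeline with two direct slice computations; objective: simpler.


-- ===== PORT A =====
def cap_anchors_hard (anchors : List (String × List String)) : List (String × List String) :=
  let d : PySem.Dict String (List String) := PySem.Dict.mk anchors
  -- `anchors or {}` is the identity on a dict argument (empty dict stays empty)
  let cases := (d.get? "cases").getD []        -- anchors.get("cases") or []  (missing → [], empty → [])
  let statutes := (d.get? "statutes").getD []
  let total : List (String × String) :=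
    cases.foldl (fun acc x => acc ++ [("case", x)]) []
  let total := statutes.foldl (fun acc x => acc ++ [("statute", x)]) total
  let total := PySem.List.slice total none (some 8)          -- total[:8]
  let p : List String × List String :=
    total.foldl (fun acc kv => if kv.1 == "case" then (acc.1 ++ [kv.2], acc.2)
                               else (acc.1, acc.2 ++ [kv.2])) ([], [])
  ((d.insert "cases" p.1).insert "statutes" p.2).items

-- ===== PORT B =====
def cap_anchors_hard_alt (anchors : List (String × List String)) : List (String × List String) :=
  let d : PySem.Dict String (List String) := PySem.Dict.mk anchors
  let cases := (d.get? "cases").getD []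
  let statutes := (d.get? "statutes").getD []
  let new_cases := PySem.List.slice cases none (some 8)                                   -- cases[:8]
  let new_statutes := PySem.List.slice statutes none (some (max 0 (8 - (new_cases.length : Int))))  -- statutes[:max(0, 8 - len(new_cases))]
  ((d.insert "cases" new_cases).insert "statutes" new_statutes).items

-- ===== PRECONDITION & SPEC =====
def Spec_cap_anchors_hard (anchors : List (String × List String)) (out : List (String × List String)) : Prop := out = cap_anchors_hard_alt anchors
instance (anchors : List (String × List String)) (out : List (String × List String)) : Decidable (Spec_cap_anchors_hard anchors out) := by unfold Spec_cap_anchors_hard; infer_instance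

-- ===== CLAIM (what is proved, stated in full; the proofs are below) =====
def Claim_equal_cap_anchors_hard : Prop := ∀ (anchors : List (String × List String)), Dom_cap_anchors_hard anchors → Spec_cap_anchors_hard anchors (cap_anchors_hard anchors)

-- ===== LEMMAS AND PROOFS =====

-- the partition loop run over a block of "case"-tagged pairs moves them all to the first bucket
lemma part_cases (xs : List String) (acc : List String × List String) :
    (xs.map (Prod.mk ("case" : String))).foldl
      (fun acc kv => if kv.1 == "case" then (acc.1 ++ [kv.2], acc.2)
                     else (acc.1, acc.2 ++ [kv.2])) acc = (acc.1 ++ xs, acc.2) := by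
  induction xs generalizing acc with
  | nil => simp
  | cons x xs ih =>
    rw [List.map_cons, List.foldl_cons, if_pos (show ((Prod.mk ("case" : String) x).1 == "case") = true from rfl)]
    rw [ih]; simp

-- ... and over a block of "statute"-tagged pairs moves them all to the second bucket
lemma part_statutes (xs : List String) (acc : List String × List String) :
    (xs.map (Prod.mk ("statute" : String))).foldl
      (fun acc kv => if kv.1 == "case" then (acc.1 ++ [kv.2], acc.2)
                     else (acc.1, acc.2 ++ [kv.2])) acc = (acc.1, acc.2 ++ xs) := by
  induction xs generalizing acc with
  | nil => simp
  | cons x xs ih =>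
    rw [List.map_cons, List.foldl_cons,
        if_neg (show ¬ ((Prod.mk ("statute" : String) x).1 == "case") = true from by simp)]
    rw [ih]; simp

lemma slice_to_eight {α : Type} (xs : List α) :
    PySem.List.slice xs none (some 8) = xs.take 8 := by
  simpa using PySem.List.slice_to_natCast xs 8

lemma slice_to_max {α : Type} (xs : List α) (n : Nat) :
    PySem.List.slice xs none (some (max 0 (8 - (n : Int)))) = xs.take (8 - n) := by
  have h : max 0 (8 - (n : Int)) = ((8 - n : Nat) : Int) := by omega
  rw [h, PySem.List.slice_to_natCast]

-- ===== VERDICT (by name: the statement is the Claim_ definition above) =====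
theorem cap_anchors_hard_spec : Claim_equal_cap_anchors_hard := by
  intro anchors _
  unfold Spec_cap_anchors_hard cap_anchors_hard cap_anchors_hard_alt
  set d : PySem.Dict String (List String) := PySem.Dict.mk anchors
  set cases := (d.get? "cases").getD [] with hc
  set statutes := (d.get? "statutes").getD [] with hs
  simp only [PySem.List.foldl_append_singleton_eq_map, List.nil_append,
    slice_to_eight, slice_to_max, List.take_append, List.length_map, List.foldl_append]
  rw [← List.map_take, ← List.map_take, part_cases, part_statutes]
  have hlen : (8 : Nat) - (List.take 8 cases).length = 8 - cases.length := by
    simp [List.length_take]; omega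
  rw [hc] at hlen
  rw [hlen]
  simp
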